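-- pv_equiv track=rewrite | github.com/olgaObnosova/EGE | №25/173_Поляков.py | srp
-- ===== SOURCE A (Python) =====
-- def pr(n):
--     for i in range(2, int(n ** 0.5) + 1):
--         if n % i == 0:
--             return 0
--     return 1
--
-- def srp(n):
--     st = set()
--     for i in range(2, int(n ** 0.5) + 1):
--         if n % i == 0 and pr(i):
--             st.add(i)
--     if len(st) > 0:
--         f = sum(x for x in st) // len(st)
--         return f
--     return 0
-- ===== SOURCE B (Python) =====
-- def srp(n):
--     # Single trial-division pass: strip each found divisor's powers from a running
--     # value m, so every appended d is automatically prime (no inner primality test).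
--     primes = []
--     m = n
--     for d in range(2, int(n ** 0.5) + 1):
--         if m % d == 0:
--             primes.append(d)
--             while m % d == 0:
--                 m //= d
--     if len(primes) > 0:
--         return sum(primes) // len(primes)
--     return 0
-- ===== Notes on version B (the rewrite author's own statement) =====
-- stated objective: simpler
-- what changed: Replaces A's helper primality test run on every candidate divisor with a single trial-division factorisation pass that strips each found divisor's powers from a running value, so every collected divisor is prime by construction and the helper disappears.
import Mathlib
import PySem

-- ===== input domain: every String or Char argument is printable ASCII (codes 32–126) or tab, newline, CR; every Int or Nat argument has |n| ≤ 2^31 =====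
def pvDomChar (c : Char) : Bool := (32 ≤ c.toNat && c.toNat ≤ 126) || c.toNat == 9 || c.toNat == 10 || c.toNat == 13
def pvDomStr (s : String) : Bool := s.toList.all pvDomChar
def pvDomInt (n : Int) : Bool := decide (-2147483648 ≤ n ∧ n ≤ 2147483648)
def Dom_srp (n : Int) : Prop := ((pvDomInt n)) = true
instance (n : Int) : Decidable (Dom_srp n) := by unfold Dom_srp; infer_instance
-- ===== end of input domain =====

-- B replaces A's per-candidate primality test by a single factorisation pass that strips
-- each found divisor's powers from a running value (objective: simpler; not measurably faster).

-- ===== PORT A =====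
-- int(i ** 0.5) is ported as Nat.sqrt of the nonnegative argument (exact there on Dom).
def prA (i : Int) : Int :=
  if (PySem.List.pyRange 2 ((i.toNat.sqrt : Int) + 1)).any
      (fun j => PySem.Int.mod i j == 0) then 0 else 1

def srp (n : Int) : Int :=
  let st : PySem.Set Int :=
    (PySem.List.pyRange 2 ((n.toNat.sqrt : Int) + 1)).foldl
      (fun st i => if PySem.Int.mod n i == 0 && !(prA i == 0) then PySem.Set.add st i else st)
      PySem.Set.empty
  if st.length > 0 then PySem.Int.floordiv st.sum (st.length : Int) else 0

-- ===== PORT B =====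
-- the inner 'while m % d == 0: m //= d'; the '0 < m' conjunct is only a totality guard
-- (on Pre_srp the running value stays positive whenever the loop body runs).
def stripB (d m : Nat) : Nat :=
  if h : 2 ≤ d ∧ m % d = 0 ∧ 0 < m then stripB d (m / d) else m
  termination_by m
  decreasing_by exact Nat.div_lt_self h.2.2 (by omega)

-- the running value m is carried as a Nat (starting from n.toNat): faithful on Pre_srp
-- (0 ≤ n), where Python's m stays a nonnegative int throughout.
def srp_alt (n : Int) : Int :=
  let res := (PySem.List.pyRange 2 ((n.toNat.sqrt : Int) + 1)).foldl
      (fun (s : Nat × List Int) d =>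
        if s.1 % d.toNat = 0 then (stripB d.toNat s.1, s.2 ++ [d]) else s)
      (n.toNat, ([] : List Int))
  if res.2.length > 0 then PySem.Int.floordiv res.2.sum (res.2.length : Int) else 0

-- ===== PRECONDITION & SPEC =====
-- Pre_ excludes negative arguments, on which A raises TypeError (int() of a complex square root).
def Pre_srp (n : Int) : Prop := 0 ≤ n
instance (n : Int) : Decidable (Pre_srp n) := by unfold Pre_srp; infer_instance
def pvWitness_srp : Int := 12
def Spec_srp (n : Int) (out : Int) : Prop := out = srp_alt n
instance (n : Int) (out : Int) : Decidable (Spec_srp n out) := by unfold Spec_srp; infer_instance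

-- ===== CLAIM (what is proved, stated in full; the proofs are below) =====
def Claim_equal_srp : Prop := ∀ (n : Int), Dom_srp n → Pre_srp n → Spec_srp n (srp n)

-- ===== LEMMAS AND PROOFS =====

-- A's set-building loop over a duplicate-free list is a filter.
theorem set_fold_char (p : Int -> Bool) :
    ∀ (l acc : List Int), l.Nodup -> (∀ x ∈ l, x ∉ acc) ->
      l.foldl (fun st i => if p i then PySem.Set.add st i else st) acc = acc ++ l.filter p := by
  intro l
  induction l with
  | nil => intro acc _ _; simp
  | cons x t ih =>
      intro acc hnd hdisj
      have hx : x ∉ acc := hdisj x (by simp)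
      rcases List.nodup_cons.mp hnd with ⟨hxt, hndt⟩
      by_cases hp : p x = true
      · have hadd : PySem.Set.add acc x = acc ++ [x] := by
          simp [PySem.Set.add, PySem.Set.contains, hx]
        rw [List.foldl_cons, if_pos hp, hadd,
          ih (acc ++ [x]) hndt (by
            intro y hy
            simp only [List.mem_append, List.mem_singleton]
            rintro (h | rfl)
            · exact hdisj y (by simp [hy]) h
            · exact hxt hy),
          List.filter_cons, if_pos hp]
        simp
      · rw [List.foldl_cons, if_neg hp,
          ih acc hndt (fun y hy => hdisj y (by simp [hy])),
          List.filter_cons, if_neg hp]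

theorem stripB_dvd (d : Nat) : ∀ m, stripB d m ∣ m := by
  intro m
  induction m using Nat.strong_induction_on with
  | _ m ih =>
    rw [stripB]
    split
    · rename_i h
      have hlt : m / d < m := Nat.div_lt_self h.2.2 (by omega)
      exact (ih _ hlt).trans (Nat.div_dvd_of_dvd (Nat.dvd_of_mod_eq_zero h.2.1))
    · exact dvd_rfl

theorem stripB_pos (d : Nat) : ∀ m, 0 < m -> 0 < stripB d m := by
  intro m
  induction m using Nat.strong_induction_on with
  | _ m ih =>
    intro hm
    rw [stripB]
    split
    · rename_i h
      have hdvd : d ∣ m := Nat.dvd_of_mod_eq_zero h.2.1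
      have hlt : m / d < m := Nat.div_lt_self h.2.2 (by omega)
      exact ih _ hlt (Nat.div_pos (Nat.le_of_dvd hm hdvd) (by omega))
    · exact hm

theorem stripB_not_dvd (d : Nat) (hd : 2 ≤ d) : ∀ m, 0 < m -> ¬ d ∣ stripB d m := by
  intro m
  induction m using Nat.strong_induction_on with
  | _ m ih =>
    intro hm
    rw [stripB]
    split
    · rename_i h
      have hdvd : d ∣ m := Nat.dvd_of_mod_eq_zero h.2.1
      have hlt : m / d < m := Nat.div_lt_self h.2.2 (by omega)
      exact ih _ hlt (Nat.div_pos (Nat.le_of_dvd hm hdvd) (by omega))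
    · rename_i h
      intro hcon
      exact h ⟨hd, Nat.mod_eq_zero_of_dvd hcon, hm⟩

theorem stripB_dvd_iff (d p : Nat) (hp : Nat.Prime p) (hpd : ¬ p ∣ d) :
    ∀ m, (p ∣ stripB d m ↔ p ∣ m) := by
  intro m
  induction m using Nat.strong_induction_on with
  | _ m ih =>
    rw [stripB]
    split
    · rename_i h
      have hdvd : d ∣ m := Nat.dvd_of_mod_eq_zero h.2.1
      have hlt : m / d < m := Nat.div_lt_self h.2.2 (by omega)
      rw [ih _ hlt]
      constructor
      · exact fun hq => hq.trans (Nat.div_dvd_of_dvd hdvd)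
      · intro hq
        have hmul : m / d * d = m := Nat.div_mul_cancel hdvd
        have hq2 : p ∣ m / d * d := by rw [hmul]; exact hq
        rcases hp.dvd_mul.mp hq2 with h1 | h1
        · exact h1
        · exact absurd h1 hpd
    · exact Iff.rfl

-- characterisation of B's trial-division loop: the collected divisors are exactly
-- the primes dividing N in the scanned interval
theorem bfold_char (N : Nat) :
    ∀ (c a : Nat) (m : Nat) (ps : List Int), 2 ≤ a -> 0 < m -> m ∣ N ->
    (∀ p, Nat.Prime p -> p < a -> ¬ p ∣ m) ->
    (∀ p, Nat.Prime p -> p ∣ N -> a ≤ p -> p ∣ m) ->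
    ((List.range' a c).foldl
        (fun (s : Nat × List Int) d => if s.1 % d = 0 then (stripB d s.1, s.2 ++ [(d : Int)]) else s)
        (m, ps)).2
      = ps ++ ((List.range' a c).filter (fun d => decide (d ∣ N ∧ d.Prime))).map (fun d : Nat => (d : Int)) := by
  intro c
  induction c with
  | zero => intro a m ps _ _ _ _ _; simp
  | succ c ih =>
      intro a m ps ha hm hmN hlow hhigh
      rw [List.range'_succ]
      by_cases hdm : a ∣ m
      · have hmod : m % a = 0 := Nat.mod_eq_zero_of_dvd hdm
        have hane : a ≠ 1 := by omega
        have hq := Nat.minFac_prime hane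
        have hqm : a.minFac ∣ m := (Nat.minFac_dvd a).trans hdm
        have hqa : a ≤ a.minFac := le_of_not_gt (fun hlt => hlow _ hq hlt hqm)
        have hqle : a.minFac ≤ a := Nat.le_of_dvd (by omega) (Nat.minFac_dvd a)
        have haprime : a.Prime := by
          have heq : a.minFac = a := le_antisymm hqle hqa
          rwa [heq] at hq
        have haN : a ∣ N := hdm.trans hmN
        rw [List.foldl_cons, if_pos hmod,
          ih (a + 1) (stripB a m) (ps ++ [(a : Int)]) (by omega)
            (stripB_pos a m hm) ((stripB_dvd a m).trans hmN)
            (by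
              intro p hp hpa hpdvd
              rcases Nat.lt_succ_iff_lt_or_eq.mp hpa with h1 | rfl
              · exact hlow p hp h1 (hpdvd.trans (stripB_dvd a m))
              · exact stripB_not_dvd p ha m hm hpdvd)
            (by
              intro p hp hpN hap
              have hpne : ¬ p ∣ a := fun hpd => absurd (Nat.le_of_dvd (by omega) hpd) (by omega)
              exact (stripB_dvd_iff a p hp hpne m).mpr (hhigh p hp hpN (by omega))),
          List.filter_cons]
        simp [haN, haprime]
      · have hmod : ¬ m % a = 0 := fun h => hdm (Nat.dvd_of_mod_eq_zero h)
        have hnot : ¬ (a ∣ N ∧ a.Prime) := fun hc => hdm (hhigh a hc.2 hc.1 le_rfl)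
        rw [List.foldl_cons, if_neg hmod,
          ih (a + 1) m ps (by omega) hm hmN
            (by
              intro p hp hpa hpdvd
              rcases Nat.lt_succ_iff_lt_or_eq.mp hpa with h1 | rfl
              · exact hlow p hp h1 hpdvd
              · exact hdm hpdvd)
            (fun p hp hpN hap => hhigh p hp hpN (by omega)),
          List.filter_cons]
        simp [hnot]

-- list(range(2, c + 1)) as a mapped Nat list
theorem range_cast (c : Nat) :
    PySem.List.pyRange 2 ((c : Int) + 1) = (List.range' 2 (c - 1)).map (fun k : Nat => (k : Int)) := by
  rw [PySem.List.pyRange_one, List.range'_eq_map_range, List.map_map]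
  have h1 : ((c : Int) + 1 - 2).toNat = c - 1 := by omega
  rw [h1]
  apply List.map_congr_left
  intro k _
  simp only [Function.comp_apply]
  push_cast
  ring

-- the inner any-loop of A's pr finds a divisor in [2, sqrt d]
theorem any_div_iff (d : Nat) :
    ((PySem.List.pyRange 2 ((d.sqrt : Int) + 1)).any
        (fun j => PySem.Int.mod ((d : Nat) : Int) j == 0) = true)
      ↔ ∃ m : Nat, 2 ≤ m ∧ m ≤ d.sqrt ∧ m ∣ d := by
  rw [List.any_eq_true]
  constructor
  · rintro ⟨j, hmem, hdvd⟩
    rw [PySem.List.mem_pyRange_one] at hmem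
    rw [beq_iff_eq, PySem.Int.mod_eq_zero_iff_dvd] at hdvd
    refine ⟨j.toNat, by omega, by omega, ?_⟩
    have hj : ((j.toNat : Nat) : Int) = j := by omega
    rw [← hj] at hdvd
    exact_mod_cast hdvd
  · rintro ⟨m, hm2, hms, hmd⟩
    refine ⟨(m : Int), ?_, ?_⟩
    · rw [PySem.List.mem_pyRange_one]; omega
    · rw [beq_iff_eq, PySem.Int.mod_eq_zero_iff_dvd]
      exact_mod_cast hmd

-- A's per-candidate test pr is primality (for 2 ≤ d)
theorem prA_char (d : Nat) (hd : 2 ≤ d) :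
    prA ((d : Nat) : Int) = if d.Prime then 1 else 0 := by
  have htn : (((d : Nat) : Int)).toNat = d := Int.toNat_natCast d
  by_cases hp : d.Prime
  · have hno : ¬ ∃ m : Nat, 2 ≤ m ∧ m ≤ d.sqrt ∧ m ∣ d := by
      rintro ⟨m, h1, h2, h3⟩
      exact (Nat.prime_def_le_sqrt.mp hp).2 m h1 h2 h3
    rw [prA, htn, if_neg (fun h => hno ((any_div_iff d).mp h)), if_pos hp]
  · have hyes : ∃ m : Nat, 2 ≤ m ∧ m ≤ d.sqrt ∧ m ∣ d := by
      by_contra hno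
      push Not at hno
      exact hp (Nat.prime_def_le_sqrt.mpr ⟨hd, fun m h1 h2 => hno m h1 h2⟩)
    rw [prA, htn, if_pos ((any_div_iff d).mpr hyes), if_neg hp]

-- A's loop test equals "d is a prime divisor of N"
theorem pA_char (N d : Nat) (hd : 2 ≤ d) :
    (PySem.Int.mod ((N : Nat) : Int) ((d : Nat) : Int) == 0 && !(prA ((d : Nat) : Int) == 0))
      = decide (d ∣ N ∧ d.Prime) := by
  rw [prA_char d hd, PySem.Int.mod_natCast]
  by_cases h1 : d ∣ N <;> by_cases h2 : d.Prime <;>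
    simp [h1, h2, Int.natCast_dvd_natCast]

-- ===== VERDICT (by name: the statement is the Claim_ definition above) =====
theorem srp_spec : Claim_equal_srp := by
  intro n _ hpre
  unfold Spec_srp
  obtain ⟨N, rfl⟩ : ∃ N : Nat, n = (N : Int) := ⟨n.toNat, (Int.toNat_of_nonneg hpre).symm⟩
  by_cases hN0 : N = 0
  · subst hN0; decide
  have hNpos : 0 < N := Nat.pos_of_ne_zero hN0
  have htn : (((N : Nat) : Int)).toNat = N := Int.toNat_natCast N
  have hnd : ((List.range' 2 (N.sqrt - 1)).map (fun k : Nat => (k : Int))).Nodup :=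
    (List.nodup_range' 1 (by norm_num)).map (fun a b h => by exact_mod_cast h)
  simp only [srp, srp_alt, htn, range_cast]
  rw [set_fold_char _ _ PySem.Set.empty hnd (by intro x _ h; exact (List.not_mem_nil h))]
  rw [List.foldl_map]
  simp only [Int.toNat_natCast]
  rw [bfold_char N (N.sqrt - 1) 2 N [] (le_refl 2) hNpos dvd_rfl
    (fun p hp hlt _ => absurd hp.two_le (by omega))
    (fun p _ _ _ => ‹_›)]
  rw [List.filter_map]
  rw [List.filter_congr (q := fun d : Nat => decide (d ∣ N ∧ Nat.Prime d)) (fun x hx => by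
    have hx2 : 2 ≤ x := (List.mem_range'_1.mp hx).1
    simpa only [Function.comp_apply] using pA_char N x hx2)]
  simp [PySem.Set.empty]
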